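-- pv_equiv track=rewrite | github.com/rpural/DailyCodingProblem | Daily Coding Problem/spreadColumns.py | base26
-- ===== SOURCE A (Python) =====
-- def base26(value):
--     ''' Given a decimal value, return the base 26 column name for that value
--     '''
--     digits = list()
--
--     while value > 0:
--         digits.append( value % 26 )
--         value //= 26
--
--     result = ''
--     while len(digits) > 0:
--         digit = digits.pop()
--         result = result + 'ABCDEFGHIJKLMNOPQRSTUVWXYZ'[digit-1]
--     return result
-- ===== SOURCE B (Python) =====
-- def base26(value):
--     ''' Given a decimal value, return the base 26 column name for that value
--     '''
--     if value <= 0: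
--         return ''
--     return base26(value // 26) + 'ABCDEFGHIJKLMNOPQRSTUVWXYZ'[value % 26 - 1]
-- ===== Notes on version B (the rewrite author's own statement) =====
-- stated objective: simpler
-- what changed: Replaces A's two-phase loop pair (build a digit stack, then pop it to append characters) with a three-line recursion on value // 26 that needs no intermediate list and no second loop, keeping the value % 26 - 1 indexing (digit 0 maps to 'Z' via index -1).
import Mathlib
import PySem

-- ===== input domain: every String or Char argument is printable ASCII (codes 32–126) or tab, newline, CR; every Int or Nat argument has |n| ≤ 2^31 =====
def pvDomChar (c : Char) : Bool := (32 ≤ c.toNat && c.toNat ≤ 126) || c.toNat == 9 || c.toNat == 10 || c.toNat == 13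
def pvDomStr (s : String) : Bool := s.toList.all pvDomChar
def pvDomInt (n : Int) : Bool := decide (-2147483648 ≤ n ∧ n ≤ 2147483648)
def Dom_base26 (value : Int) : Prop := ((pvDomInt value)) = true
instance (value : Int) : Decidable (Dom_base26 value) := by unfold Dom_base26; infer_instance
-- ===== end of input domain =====

-- B replaces A's two loops (digit stack, then pop-and-append) by a three-line recursion on value // 26; same return value, no speed claim.

-- termination measure shared by both ports' recursions: value // 26 < value for positive value
theorem pvFloordiv26_lt (value : Int) (h : 0 < value) :
    (PySem.Int.floordiv value 26).toNat < value.toNat := by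
  rw [PySem.Int.floordiv_eq_ediv_of_pos (by norm_num)]
  omega

-- ===== PORT A =====
-- first while-loop: digits.append(value % 26); value //= 26
def base26DigitsLoop (value : Int) : List Int :=
  if h : value > 0 then
    PySem.Int.mod value 26 :: base26DigitsLoop (PySem.Int.floordiv value 26)
  else []
termination_by value.toNat
decreasing_by exact pvFloordiv26_lt value h

-- second while-loop: digit = digits.pop(); result = result + ALPHA[digit-1]
-- (the none branch is Python's IndexError; digit is always in [0, 26) so it never fires)
def base26PopLoop (digits : List Int) (result : String) : String :=
  match hp : PySem.List.pop? digits with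
  | none => result
  | some (digit, rest) =>
      base26PopLoop rest
        (match PySem.Str.pyGet? "ABCDEFGHIJKLMNOPQRSTUVWXYZ" (digit - 1) with
         | some c => result.push c
         | none => result)
termination_by digits.length
decreasing_by
  have := PySem.List.length_of_pop?_eq_some digits hp
  simp at this ⊢; omega

def base26 (value : Int) : String :=
  base26PopLoop (base26DigitsLoop value) ""

-- ===== PORT B =====
-- (the none branch is Python's IndexError; value % 26 ∈ [0, 26) so it never fires)
def base26_alt (value : Int) : String :=
  if h : value ≤ 0 then ""
  else
    base26_alt (PySem.Int.floordiv value 26) ++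
      (match PySem.Str.pyGet? "ABCDEFGHIJKLMNOPQRSTUVWXYZ" (PySem.Int.mod value 26 - 1) with
       | some c => String.singleton c
       | none => "")
termination_by value.toNat
decreasing_by exact pvFloordiv26_lt value (by omega)

-- ===== PRECONDITION & SPEC =====
def Spec_base26 (value : Int) (out : String) : Prop := out = base26_alt value
instance (value : Int) (out : String) : Decidable (Spec_base26 value out) := by unfold Spec_base26; infer_instance

-- ===== CLAIM (what is proved, stated in full; the proofs are below) =====
def Claim_equal_base26 : Prop := ∀ (value : Int), Dom_base26 value → Spec_base26 value (base26 value)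

-- ===== LEMMAS AND PROOFS =====

-- the one-character string A appends / B concatenates for a digit d
def pvStrOf (d : Int) : String :=
  match PySem.Str.pyGet? "ABCDEFGHIJKLMNOPQRSTUVWXYZ" (d - 1) with
  | some c => String.singleton c
  | none => ""

-- concatenation of the per-digit strings, head first
def pvTStr : List Int → String
  | [] => ""
  | d :: ds => pvStrOf d ++ pvTStr ds

theorem pvTStr_append_singleton (ds : List Int) (d : Int) :
    pvTStr (ds ++ [d]) = pvTStr ds ++ pvStrOf d := by
  induction ds with
  | nil => simp [pvTStr]
  | cons x xs ih => simp [pvTStr, ih, String.append_assoc]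

theorem pvPopLoop_eq (ds : List Int) (r : String) :
    base26PopLoop ds r = r ++ pvTStr ds.reverse := by
  induction ds using List.reverseRecOn generalizing r with
  | nil => rw [base26PopLoop]; simp [pvTStr, PySem.List.pop?, PySem.List.pyIdx?]
  | append_singleton xs d ih =>
      rw [base26PopLoop]
      rw [PySem.List.pop?_last]
      simp only
      rw [ih]
      have hstep : (match PySem.Str.pyGet? "ABCDEFGHIJKLMNOPQRSTUVWXYZ" (d - 1) with
          | some c => r.push c
          | none => r) = r ++ pvStrOf d := by
        unfold pvStrOf
        cases PySem.Str.pyGet? "ABCDEFGHIJKLMNOPQRSTUVWXYZ" (d - 1) with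
        | none => simp
        | some c => exact (String.append_singleton).symm
      rw [hstep, String.append_assoc]
      congr 1
      rw [List.reverse_append]
      simp [pvTStr]

theorem pvAlt_eq_tstr (value : Int) :
    base26_alt value = pvTStr (base26DigitsLoop value).reverse := by
  by_cases h : value ≤ 0
  · rw [base26_alt, base26DigitsLoop, dif_pos h, dif_neg (by omega)]
    rfl
  · have hpos : value > 0 := by omega
    rw [base26_alt, base26DigitsLoop, dif_neg h, dif_pos hpos]
    rw [List.reverse_cons, pvTStr_append_singleton]
    rw [pvAlt_eq_tstr (PySem.Int.floordiv value 26)]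
    rfl
termination_by value.toNat
decreasing_by exact pvFloordiv26_lt value (by omega)

-- ===== VERDICT (by name: the statement is the Claim_ definition above) =====
theorem base26_spec : Claim_equal_base26 := by
  intro value _
  show base26 value = base26_alt value
  rw [base26, pvPopLoop_eq, pvAlt_eq_tstr]
  simp
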